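-- pv_equiv track=rewrite | github.com/alex-s-hong/code_prep | twitter/unique_twitter_user_id_set.py | getUniqueUserIdSum2
-- ===== SOURCE A (Python) =====
-- def getUniqueUserIdSum2(s:list):
--     buckets = {}
--
--     elem_sum = 0
--
--     for elem in s:
--         elem_sum += elem
--         if elem in buckets:
--             cur_increment = 1
--             cur_elem = elem + 1
--             while cur_elem in buckets:
--                 cur_elem +=1
--                 cur_increment +=1
--             buckets[cur_elem] = True
--             elem_sum += cur_increment
--         else:
--             buckets[elem] = True
--
--     return elem_sum
-- ===== SOURCE B (Python) =====
-- def getUniqueUserIdSum2(s: list):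
--     total = 0
--     prev = None
--     for v in sorted(s):
--         cur = v if prev is None or v > prev else prev + 1
--         total += cur
--         prev = cur
--     return total
-- ===== Notes on version B (the rewrite author's own statement) =====
-- stated objective: faster
-- what changed: Replaced per-element forward linear probing over a hash table (worst-case quadratic on duplicate-heavy input) by sort-then-single-pass: each sorted value is placed at max(value, prev+1) and accumulated.
import Mathlib
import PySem

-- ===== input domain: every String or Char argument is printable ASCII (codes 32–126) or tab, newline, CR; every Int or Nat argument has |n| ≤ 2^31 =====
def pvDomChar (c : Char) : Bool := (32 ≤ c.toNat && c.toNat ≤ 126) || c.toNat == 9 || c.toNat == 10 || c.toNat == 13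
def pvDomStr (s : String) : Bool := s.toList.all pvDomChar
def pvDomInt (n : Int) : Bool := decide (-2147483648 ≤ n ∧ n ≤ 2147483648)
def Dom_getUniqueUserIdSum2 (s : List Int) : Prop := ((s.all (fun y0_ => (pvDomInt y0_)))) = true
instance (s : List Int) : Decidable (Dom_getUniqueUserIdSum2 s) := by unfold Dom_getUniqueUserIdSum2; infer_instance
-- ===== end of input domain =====

-- B replaces A's per-element forward linear probing (worst-case quadratic) by
-- sort-then-single-pass greedy placement at max(value, prev+1); same return value.

-- ===== PORT A =====
-- termination helper for the Python `while cur_elem in buckets` loop (cited by decreasing_by)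
theorem pvFiltLt (l : List Int) (x : Int) (h : x ∈ l) :
    (l.filter (fun k => decide (x + 1 ≤ k))).length < (l.filter (fun k => decide (x ≤ k))).length := by
  simp only [← List.countP_eq_length_filter]
  induction l with
  | nil => simp at h
  | cons a t ih =>
    have mono : List.countP (fun k => decide (x + 1 ≤ k)) t ≤ List.countP (fun k => decide (x ≤ k)) t :=
      List.countP_mono_left (by intro b _ hb; simp at hb ⊢; omega)
    simp only [List.countP_cons]
    cases hb : decide (x + 1 ≤ a) <;> cases hb2 : decide (x ≤ a) <;>
        simp only [if_true, if_false, Bool.false_eq_true] <;>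
        simp at hb hb2 <;> rcases List.mem_cons.mp h with h | h
    · omega
    · have := ih h; omega
    · omega
    · have := ih h; omega
    · exact absurd hb2 (by omega)
    · have := ih h; omega
    · omega
    · have := ih h; omega

-- the `while cur_elem in buckets: cur_elem += 1; cur_increment += 1` loop of A
def pvProbe (buckets : PySem.Dict Int Bool) (cur_elem cur_increment : Int) : Int × Int :=
  if h : buckets.contains cur_elem then
    pvProbe buckets (cur_elem + 1) (cur_increment + 1)
  else
    (cur_elem, cur_increment)
termination_by (buckets.keys.filter (fun k => decide (cur_elem ≤ k))).length
decreasing_by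
  exact pvFiltLt buckets.keys cur_elem ((PySem.Dict.contains_iff_mem_keys _ _).mp h)

def getUniqueUserIdSum2 (s : List Int) : Int :=
  (s.foldl
    (fun st elem =>
      let buckets := st.1
      let elem_sum := st.2 + elem
      if buckets.contains elem then
        let r := pvProbe buckets (elem + 1) 1
        (buckets.insert r.1 true, elem_sum + r.2)
      else
        (buckets.insert elem true, elem_sum))
    ((PySem.Dict.empty : PySem.Dict Int Bool), 0)).2

-- ===== PORT B =====
def getUniqueUserIdSum2_alt (s : List Int) : Int :=
  ((PySem.List.sorted s (fun x => x) false).foldl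
    (fun st v =>
      let cur := match st.2 with
        | none => v
        | some p => if v > p then v else p + 1
      (st.1 + cur, some cur))
    ((0 : Int), (none : Option Int))).1

-- ===== PRECONDITION & SPEC =====
def Spec_getUniqueUserIdSum2 (s : List Int) (out : Int) : Prop := out = getUniqueUserIdSum2_alt s
instance (s : List Int) (out : Int) : Decidable (Spec_getUniqueUserIdSum2 s out) := by unfold Spec_getUniqueUserIdSum2; infer_instance

-- ===== CLAIM (what is proved, stated in full; the proofs are below) =====
def Claim_equal_getUniqueUserIdSum2 : Prop := ∀ (s : List Int), Dom_getUniqueUserIdSum2 s → Spec_getUniqueUserIdSum2 s (getUniqueUserIdSum2 s)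

-- ===== LEMMAS AND PROOFS =====

-- `pvNf B x` = the smallest integer ≥ x not in B: abstract model of A's probing.
def pvNf (B : Finset Int) (x : Int) : Int :=
  if h : x ∈ B then pvNf B (x + 1) else x
termination_by (B.filter (fun k => x ≤ k)).card
decreasing_by
  apply Finset.card_lt_card
  constructor
  · intro k hk; simp only [Finset.mem_filter] at hk ⊢; exact ⟨hk.1, by omega⟩
  · intro hsub
    have hx : x ∈ B.filter (fun k => x ≤ k) := by simp [h]
    have := hsub hx
    simp at this

def pvStep (B : Finset Int) (x : Int) : Finset Int := insert (pvNf B x) B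

theorem pvNf_spec (B : Finset Int) (x : Int) :
    pvNf B x ∉ B ∧ x ≤ pvNf B x ∧ ∀ k, x ≤ k → k < pvNf B x → k ∈ B := by
  fun_induction pvNf B x with
  | case1 x h ih =>
    exact ⟨ih.1, by omega, fun k hk1 hk2 => by
      by_cases hkx : k = x
      · exact hkx ▸ h
      · exact ih.2.2 k (by omega) hk2⟩
  | case2 x h =>
    exact ⟨h, le_refl _, fun k hk1 hk2 => by omega⟩

theorem pvNf_of_mem (B : Finset Int) (x : Int) (h : x ∈ B) : pvNf B x = pvNf B (x + 1) := by
  rw [pvNf]; simp [h]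

theorem pvNf_of_not_mem (B : Finset Int) (x : Int) (h : x ∉ B) : pvNf B x = x := by
  rw [pvNf]; simp [h]

theorem pvNf_eq (B : Finset Int) (x c : Int) (hc : c ∉ B) (hx : x ≤ c)
    (hall : ∀ k, x ≤ k → k < c → k ∈ B) : pvNf B x = c := by
  obtain ⟨h1, h2, h3⟩ := pvNf_spec B x
  rcases lt_trichotomy (pvNf B x) c with h | h | h
  · exact absurd (hall _ h2 h) h1
  · exact h
  · exact absurd (h3 c hx h) hc

-- skip over a filled interval
theorem pvNf_congr (B : Finset Int) (x c : Int) (hx : x ≤ c)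
    (hall : ∀ k, x ≤ k → k < c → k ∈ B) : pvNf B x = pvNf B c := by
  obtain ⟨h1, h2, h3⟩ := pvNf_spec B c
  exact pvNf_eq B x _ h1 (by omega)
    (fun k hk1 hk2 => by by_cases h : k < c; exacts [hall k hk1 h, h3 k (by omega) hk2])

theorem pvStep_comm_le (B : Finset Int) (x y : Int) (hxy : x ≤ y) :
    pvStep (pvStep B x) y = pvStep (pvStep B y) x := by
  obtain ⟨ha1, ha2, ha3⟩ := pvNf_spec B x
  by_cases hay : pvNf B x < y
  · obtain ⟨hc1, hc2, hc3⟩ := pvNf_spec B y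
    have hb : pvNf (insert (pvNf B x) B) y = pvNf B y :=
      pvNf_eq _ _ _ (by simp only [Finset.mem_insert]; push Not; exact ⟨by omega, hc1⟩) hc2
        (fun k hk1 hk2 => Finset.mem_insert_of_mem (hc3 k hk1 hk2))
    have hb' : pvNf (insert (pvNf B y) B) x = pvNf B x :=
      pvNf_eq _ _ _ (by simp only [Finset.mem_insert]; push Not; exact ⟨by omega, ha1⟩) ha2
        (fun k hk1 hk2 => Finset.mem_insert_of_mem (ha3 k hk1 hk2))
    unfold pvStep
    rw [hb, hb']
    exact Finset.insert_comm _ _ _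
  · have hya : pvNf B y = pvNf B x :=
      pvNf_eq B y _ ha1 (by omega) (fun k hk1 hk2 => ha3 k (by omega) hk2)
    unfold pvStep
    rw [hya]
    have e1 : pvNf (insert (pvNf B x) B) x = pvNf (insert (pvNf B x) B) (pvNf B x + 1) :=
      pvNf_congr _ _ _ (by omega) (fun k hk1 hk2 => by
        by_cases hk : k = pvNf B x
        · exact hk ▸ Finset.mem_insert_self _ _
        · exact Finset.mem_insert_of_mem (ha3 k hk1 (by omega)))
    have e2 : pvNf (insert (pvNf B x) B) y = pvNf (insert (pvNf B x) B) (pvNf B x + 1) :=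
      pvNf_congr _ _ _ (by omega) (fun k hk1 hk2 => by
        by_cases hk : k = pvNf B x
        · exact hk ▸ Finset.mem_insert_self _ _
        · exact Finset.mem_insert_of_mem (ha3 k (by omega) (by omega)))
    rw [e1, e2]

theorem pvStep_comm (B : Finset Int) (x y : Int) :
    pvStep (pvStep B x) y = pvStep (pvStep B y) x := by
  rcases le_total x y with h | h
  · exact pvStep_comm_le B x y h
  · exact (pvStep_comm_le B y x h).symm

theorem pvFold_perm {l l' : List Int} (h : l.Perm l') (B : Finset Int) :
    l.foldl pvStep B = l'.foldl pvStep B :=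
  @List.Perm.foldl_eq _ _ pvStep _ _ ⟨fun b a1 a2 => pvStep_comm b a1 a2⟩ h B

theorem pvProbe_eq (d : PySem.Dict Int Bool) (B : Finset Int)
    (hc : ∀ k : Int, d.contains k = true ↔ k ∈ B) (c inc : Int) :
    pvProbe d c inc = (pvNf B c, inc + (pvNf B c - c)) := by
  fun_induction pvProbe d c inc with
  | case1 c inc h ih =>
    rw [ih, pvNf_of_mem B c ((hc c).mp h)]
    exact Prod.ext rfl (by dsimp; omega)
  | case2 c inc h =>
    rw [pvNf_of_not_mem B c (fun hm => by simp [(hc c).mpr hm] at h)]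
    exact Prod.ext rfl (by dsimp; omega)

theorem pvA_loop (l : List Int) (d : PySem.Dict Int Bool) (acc : Int) (B : Finset Int)
    (hc : ∀ k : Int, d.contains k = true ↔ k ∈ B) :
    ((l.foldl
      (fun st elem =>
        let buckets := st.1
        let elem_sum := st.2 + elem
        if buckets.contains elem then
          let r := pvProbe buckets (elem + 1) 1
          (buckets.insert r.1 true, elem_sum + r.2)
        else
          (buckets.insert elem true, elem_sum)) (d, acc)).2)
      = acc + (∑ b ∈ l.foldl pvStep B, b) - (∑ b ∈ B, b) := by
  induction l generalizing d acc B with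
  | nil => simp
  | cons elem l ih =>
    obtain ⟨hn1, hn2, hn3⟩ := pvNf_spec B elem
    have hsum : ∑ b ∈ pvStep B elem, b = pvNf B elem + ∑ b ∈ B, b := by
      unfold pvStep; rw [Finset.sum_insert hn1]
    by_cases hmem : elem ∈ B
    · have hct : d.contains elem = true := (hc elem).mpr hmem
      simp only [List.foldl_cons, hct, if_true, pvProbe_eq d B hc]
      rw [← pvNf_of_mem B elem hmem]
      rw [ih _ _ (insert (pvNf B elem) B) (fun k => by
        simp only [PySem.Dict.contains_insert, Finset.mem_insert, Bool.or_eq_true, beq_iff_eq, hc]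
        try tauto)]
      have : pvStep B elem = insert (pvNf B elem) B := rfl
      rw [← this, hsum]
      ring
    · have hct : d.contains elem = false := by
        cases h : d.contains elem
        · rfl
        · exact absurd ((hc elem).mp h) hmem
      simp only [List.foldl_cons, hct, Bool.false_eq_true, if_false]
      rw [ih _ _ (insert elem B) (fun k => by
        simp only [PySem.Dict.contains_insert, Finset.mem_insert, Bool.or_eq_true, beq_iff_eq, hc]
        try tauto)]
      have hnf : pvNf B elem = elem := pvNf_of_not_mem B elem hmem
      have : pvStep B elem = insert elem B := by unfold pvStep; rw [hnf]
      rw [← this, hsum, hnf]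
      ring

theorem pvB_loop (l : List Int) (total p : Int) (B : Finset Int) (w : Int)
    (hle : ∀ b ∈ B, b ≤ p) (hint : ∀ k, w ≤ k → k ≤ p → k ∈ B) (hwp : w ≤ p)
    (hw : ∀ v ∈ l, w ≤ v) (hsort : l.Pairwise (· ≤ ·)) :
    ((l.foldl
      (fun st v =>
        let cur := match st.2 with
          | none => v
          | some p => if v > p then v else p + 1
        (st.1 + cur, some cur)) (total, some p)).1)
      = total + (∑ b ∈ l.foldl pvStep B, b) - (∑ b ∈ B, b) := by
  induction l generalizing total p B w with
  | nil => simp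
  | cons v l ih =>
    have hwv : w ≤ v := hw v (List.mem_cons_self ..)
    have hwl : ∀ u ∈ l, v ≤ u := fun u hu => List.rel_of_pairwise_cons hsort hu
    simp only [List.foldl_cons]
    by_cases hvp : v > p
    · have hvB : v ∉ B := fun hm => absurd (hle v hm) (by omega)
      have hstep : pvStep B v = insert v B := by unfold pvStep; rw [pvNf_of_not_mem B v hvB]
      simp only [hvp, if_true]
      rw [ih (total + v) v (insert v B) v
        (fun b hb => by rcases Finset.mem_insert.mp hb with h | h
                        · omega
                        · have := hle b h; omega)
        (fun k hk1 hk2 => by have hkv : k = v := by omega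
                             exact hkv ▸ Finset.mem_insert_self v B)
        (le_refl v) hwl (List.Pairwise.of_cons hsort)]
      rw [← hstep, hstep, Finset.sum_insert hvB, ← hstep]
      ring
    · have hnf : pvNf B v = p + 1 :=
        pvNf_eq B v (p + 1) (fun hm => absurd (hle _ hm) (by omega)) (by omega)
          (fun k hk1 hk2 => hint k (by omega) (by omega))
      have hp1B : p + 1 ∉ B := fun hm => absurd (hle _ hm) (by omega)
      have hstep : pvStep B v = insert (p + 1) B := by unfold pvStep; rw [hnf]
      simp only [hvp, if_false]
      rw [ih (total + (p + 1)) (p + 1) (insert (p + 1) B) v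
        (fun b hb => by rcases Finset.mem_insert.mp hb with h | h
                        · omega
                        · have := hle b h; omega)
        (fun k hk1 hk2 => by
          by_cases hk : k = p + 1
          · exact hk ▸ Finset.mem_insert_self _ _
          · exact Finset.mem_insert_of_mem (hint k (by omega) (by omega)))
        (by omega) hwl (List.Pairwise.of_cons hsort)]
      rw [← hstep, hstep, Finset.sum_insert hp1B, ← hstep]
      ring

-- ===== VERDICT (by name: the statement is the Claim_ definition above) =====
theorem getUniqueUserIdSum2_spec : Claim_equal_getUniqueUserIdSum2 := by
  intro s _
  unfold Spec_getUniqueUserIdSum2 getUniqueUserIdSum2 getUniqueUserIdSum2_alt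
  rw [pvA_loop s PySem.Dict.empty 0 ∅ (fun k => by simp)]
  rw [pvFold_perm (PySem.List.sorted_perm s (fun x => x) false).symm ∅]
  have hpw : (PySem.List.sorted s (fun x => x) false).Pairwise (fun a b => a ≤ b) :=
    PySem.List.sorted_pairwise s (fun x => x)
  cases ht : PySem.List.sorted s (fun x => x) false with
  | nil => simp
  | cons v rest =>
    rw [ht] at hpw
    have hstep : pvStep ∅ v = {v} := by
      unfold pvStep; rw [pvNf_of_not_mem ∅ v (Finset.notMem_empty v)]; rfl
    simp only [List.foldl_cons]
    rw [pvB_loop rest (0 + v) v {v} v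
      (fun b hb => by simp at hb; omega)
      (fun k hk1 hk2 => by simp; omega)
      (le_refl v)
      (fun u hu => List.rel_of_pairwise_cons hpw hu)
      (List.Pairwise.of_cons hpw)]
    rw [← hstep, hstep]
    simp
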